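-- pv_equiv track=rewrite | github.com/Nadock/advent_of_code | aoc_2024/day_2/day_2.py | is_bad
-- ===== SOURCE A (Python) =====
-- import itertools
--
-- def is_bad(report: list[int]) -> bool:
--     """Returns `True` if a report is bad according to the puzzle rules."""
--     increasing = None
--     for a, b in itertools.pairwise(report):
--         if increasing is None:
--             increasing = a - b > 0
--         if a - b == 0 or abs(a - b) > 3:
--             return True
--         if increasing and a - b < 0:
--             return True
--         if not increasing and a - b > 0:
--             return True
--     return False
-- ===== SOURCE B (Python) =====
-- import itertools
--
-- def is_bad(report: list[int]) -> bool:
--     """Returns `True` if a report is bad according to the puzzle rules."""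
--     deltas = [b - a for a, b in itertools.pairwise(report)]
--     good = all(1 <= d <= 3 for d in deltas) or all(-3 <= d <= -1 for d in deltas)
--     return not good
-- ===== Notes on version B (the rewrite author's own statement) =====
-- stated objective: simpler
-- what changed: Replaces A's stateful single pass with a running direction flag and four early returns by building the list of adjacent deltas once and testing two uniform all() conditions (all in [1,3] or all in [-3,-1]).
import Mathlib
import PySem

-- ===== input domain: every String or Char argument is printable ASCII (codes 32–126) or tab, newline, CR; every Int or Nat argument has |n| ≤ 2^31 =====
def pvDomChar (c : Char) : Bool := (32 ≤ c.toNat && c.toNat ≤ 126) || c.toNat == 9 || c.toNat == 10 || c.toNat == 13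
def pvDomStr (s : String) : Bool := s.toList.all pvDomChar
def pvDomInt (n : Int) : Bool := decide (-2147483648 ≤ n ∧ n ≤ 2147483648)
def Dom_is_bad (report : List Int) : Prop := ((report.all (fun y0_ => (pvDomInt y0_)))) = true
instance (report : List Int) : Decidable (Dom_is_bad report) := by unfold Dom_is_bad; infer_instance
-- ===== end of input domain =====

-- B builds the adjacent-delta list once and tests two uniform all-conditions instead of
-- A's running direction flag with four early returns (objective: simpler).

-- ===== PORT A =====
-- the for-loop over itertools.pairwise(report) with early returns, state = the `increasing` flag
def isBadLoop (increasing : Option Bool) : List Int → Bool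
  | a :: b :: rest =>
    let inc := match increasing with
      | none => decide (a - b > 0)
      | some i => i
    if a - b = 0 ∨ (a - b).natAbs > 3 then true
    else if inc = true ∧ a - b < 0 then true
    else if ¬ inc = true ∧ a - b > 0 then true
    else isBadLoop (some inc) (b :: rest)
  | _ => false

def is_bad (report : List Int) : Bool := isBadLoop none report

-- ===== PORT B =====
def is_bad_alt (report : List Int) : Bool :=
  let deltas := (report.zip report.tail).map (fun p => p.2 - p.1)
  let good := deltas.all (fun d => decide (1 ≤ d ∧ d ≤ 3)) ||
              deltas.all (fun d => decide (-3 ≤ d ∧ d ≤ -1))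
  !good

-- ===== PRECONDITION & SPEC =====
def Spec_is_bad (report : List Int) (out : Bool) : Prop := out = is_bad_alt report
instance (report : List Int) (out : Bool) : Decidable (Spec_is_bad report out) := by unfold Spec_is_bad; infer_instance

-- ===== CLAIM (what is proved, stated in full; the proofs are below) =====
def Claim_equal_is_bad : Prop := ∀ (report : List Int), Dom_is_bad report → Spec_is_bad report (is_bad report)

-- ===== LEMMAS AND PROOFS =====

-- once the direction flag is fixed, A's loop is the negation of one uniform all-condition
theorem isBadLoop_some (inc : Bool) (l : List Int) :
    isBadLoop (some inc) l =
      !((l.zip l.tail).map (fun p => p.2 - p.1)).all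
        (fun d => if inc then decide (-3 ≤ d ∧ d ≤ -1) else decide (1 ≤ d ∧ d ≤ 3)) := by
  induction l with
  | nil => simp [isBadLoop]
  | cons a t ih =>
    cases t with
    | nil => simp [isBadLoop]
    | cons b rest =>
      rw [isBadLoop]
      simp only [List.tail_cons, List.zip_cons_cons, List.map_cons, List.all_cons] at ih ⊢
      cases inc
      · simp only [Bool.false_eq_true, reduceIte] at ih ⊢
        split_ifs with h1 h2 h3
        · have hbad : ¬((1:Int) ≤ b - a ∧ b - a ≤ 3) := by omega
          rw [decide_eq_false hbad]; simp
        · exact h2.1.elim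
        · have hbad : ¬((1:Int) ≤ b - a ∧ b - a ≤ 3) := by
            have := h3.2; omega
          rw [decide_eq_false hbad]; simp
        · have h3' : ¬ a - b > 0 := fun h => h3 ⟨not_false, h⟩
          have hgood : (1:Int) ≤ b - a ∧ b - a ≤ 3 := by constructor <;> omega
          rw [ih, decide_eq_true hgood]; simp
      · simp only [reduceIte] at ih ⊢
        split_ifs with h1 h2 h3
        · have hbad : ¬((-3:Int) ≤ b - a ∧ b - a ≤ -1) := by omega
          rw [decide_eq_false hbad]; simp
        · have hbad : ¬((-3:Int) ≤ b - a ∧ b - a ≤ -1) := by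
            have := h2.2; omega
          rw [decide_eq_false hbad]; simp
        · exact (h3.1 trivial).elim
        · have h2' : ¬ a - b < 0 := fun h => h2 ⟨trivial, h⟩
          have hgood : (-3:Int) ≤ b - a ∧ b - a ≤ -1 := by constructor <;> omega
          rw [ih, decide_eq_true hgood]; simp

theorem is_bad_eq_alt (report : List Int) : is_bad report = is_bad_alt report := by
  cases report with
  | nil => rfl
  | cons a t =>
    cases t with
    | nil => rfl
    | cons b rest =>
      rw [is_bad, isBadLoop, is_bad_alt]
      simp only [List.tail_cons, List.zip_cons_cons, List.map_cons, List.all_cons]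
      by_cases hd : a - b > 0
      · -- flag = increasing; the first delta b - a is negative, so B's "all up" test fails
        have hup : ¬((1:Int) ≤ b - a ∧ b - a ≤ 3) := by omega
        simp only [hd, decide_true, decide_eq_false hup, Bool.false_and, Bool.false_or]
        split_ifs with h1 h2 h3
        · have hdn : ¬((-3:Int) ≤ b - a ∧ b - a ≤ -1) := by omega
          rw [decide_eq_false hdn]; simp
        · omega
        · exact (h3.1 trivial).elim
        · rw [isBadLoop_some]
          have hdn : (-3:Int) ≤ b - a ∧ b - a ≤ -1 := by constructor <;> omega
          simp only [List.tail_cons, reduceIte, decide_eq_true hdn, Bool.true_and]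
      · -- flag = not increasing; the first delta b - a is ≥ 0, so B's "all down" test fails
        have hdn : ¬((-3:Int) ≤ b - a ∧ b - a ≤ -1) := by omega
        simp only [hd, decide_false, decide_eq_false hdn, Bool.false_and, Bool.or_false]
        split_ifs with h1 h2 h3
        · have hup : ¬((1:Int) ≤ b - a ∧ b - a ≤ 3) := by omega
          rw [decide_eq_false hup]; simp
        · exact h2.1.elim
        · exact h3.2.elim
        · rw [isBadLoop_some]
          have hup : (1:Int) ≤ b - a ∧ b - a ≤ 3 := by constructor <;> omega
          simp only [List.tail_cons, Bool.false_eq_true, reduceIte, decide_eq_true hup,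
            Bool.true_and]

-- ===== VERDICT (by name: the statement is the Claim_ definition above) =====
theorem is_bad_spec : Claim_equal_is_bad := by
  intro report _
  unfold Spec_is_bad
  exact is_bad_eq_alt report
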